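-- pv_equiv track=rewrite | github.com/Zhengtianxin/excel-splitter | excel_splitter.py | detect_nested_values
-- ===== SOURCE A (Python) =====
-- def detect_nested_values(group_names):
--     names = sorted(group_names, key=len)
--     nested_pairs = []
--     for i in range(len(names)):
--         for j in range(i + 1, len(names)):
--             short_name, long_name = names[i], names[j]
--             if short_name == long_name:
--                 continue
--             if short_name in long_name:
--                 nested_pairs.append((short_name, long_name))
--     return nested_pairs
-- ===== SOURCE B (Python) =====
-- def detect_nested_values(group_names):
--     # Process names shortest-first; each name is paired only with the strictly
--     # longer names still in the queue (equal-length names can only contain each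
--     # other by being equal, which the original skips anyway).
--     names = sorted(group_names, key=len)
--     pairs = []
--     while names:
--         s = names.pop(0)
--         pairs += [(s, l) for l in names if len(s) < len(l) and s in l]
--     return pairs
-- ===== Notes on version B (the rewrite author's own statement) =====
-- stated objective: simpler
-- what changed: Replaces the double index loop with equality test by a shortest-first queue consumed with pop(0): each name is compared only against strictly longer names via a length test, so index arithmetic and the string-equality skip disappear.
import Mathlib
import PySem

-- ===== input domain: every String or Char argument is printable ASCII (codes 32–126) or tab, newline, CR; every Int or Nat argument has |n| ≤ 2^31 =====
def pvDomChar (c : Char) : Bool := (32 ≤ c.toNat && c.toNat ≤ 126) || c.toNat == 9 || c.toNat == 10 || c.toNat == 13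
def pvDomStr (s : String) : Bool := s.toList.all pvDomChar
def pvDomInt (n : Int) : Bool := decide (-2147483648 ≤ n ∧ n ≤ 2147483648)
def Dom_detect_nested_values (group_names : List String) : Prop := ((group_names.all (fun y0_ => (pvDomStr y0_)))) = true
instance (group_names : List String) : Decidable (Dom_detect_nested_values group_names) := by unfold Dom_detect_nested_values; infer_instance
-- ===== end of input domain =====

-- B replaces A's double index loop (with its string-equality skip) by a shortest-first
-- queue consumed one head at a time, pairing each name only with strictly longer names;
-- objective: simpler (no index arithmetic, no equality test).

-- ===== PORT A =====
def detect_nested_values (group_names : List String) : List (String × String) :=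
  let names := PySem.List.sorted group_names (fun s => PySem.Str.len s)
  (PySem.List.pyRange 0 (PySem.List.len names)).foldl (fun nested_pairs i =>
    (PySem.List.pyRange (i + 1) (PySem.List.len names)).foldl (fun nested_pairs j =>
      if PySem.List.pyGetD names i "" == PySem.List.pyGetD names j "" then nested_pairs
      else if PySem.Str.isIn (PySem.List.pyGetD names i "") (PySem.List.pyGetD names j "") then
        nested_pairs ++ [(PySem.List.pyGetD names i "", PySem.List.pyGetD names j "")]
      else nested_pairs) nested_pairs) []

-- ===== PORT B =====
-- the 'while names: s = names.pop(0); pairs += [...]' loop of Source B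
def pvCollect : List String → List (String × String) → List (String × String)
  | [], pairs => pairs
  | s :: names, pairs =>
      pvCollect names
        (pairs ++ (names.filter (fun l =>
          decide (PySem.Str.len s < PySem.Str.len l) && PySem.Str.isIn s l)).map (fun l => (s, l)))

def detect_nested_values_alt (group_names : List String) : List (String × String) :=
  pvCollect (PySem.List.sorted group_names (fun s => PySem.Str.len s)) []

-- ===== PRECONDITION & SPEC =====
def Spec_detect_nested_values (group_names : List String) (out : List (String × String)) : Prop := out = detect_nested_values_alt group_names
instance (group_names : List String) (out : List (String × String)) : Decidable (Spec_detect_nested_values group_names out) := by unfold Spec_detect_nested_values; infer_instance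

-- ===== CLAIM (what is proved, stated in full; the proofs are below) =====
def Claim_equal_detect_nested_values : Prop := ∀ (group_names : List String), Dom_detect_nested_values group_names → Spec_detect_nested_values group_names (detect_nested_values group_names)

-- ===== LEMMAS AND PROOFS =====

-- On names that are not shorter (as every later element of the length-sorted list is),
-- "different and contained" coincides with "strictly longer and contained".
lemma pv_cond_eq (s l : String) (h : PySem.Str.len s ≤ PySem.Str.len l) :
    (!(s == l) && PySem.Str.isIn s l)
      = (decide (PySem.Str.len s < PySem.Str.len l) && PySem.Str.isIn s l) := by
  cases hin : PySem.Str.isIn s l with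
  | false => simp
  | true =>
    have hinf : s.toList <:+: l.toList := (PySem.Str.isIn_iff_infix s l).mp hin
    simp only [Bool.and_true]
    by_cases hlt : PySem.Str.len s < PySem.Str.len l
    · have hne : s ≠ l := by
        intro he; subst he; exact lt_irrefl _ hlt
      rw [beq_eq_false_iff_ne.mpr hne, decide_eq_true hlt]
      rfl
    · have hlen : s.toList.length = l.toList.length := by
        simp only [PySem.Str.len_eq] at h hlt
        omega
      have heq : s = l := String.toList_inj.mp (hinf.eq_of_length hlen)
      rw [beq_iff_eq.mpr heq, decide_eq_false hlt]
      rfl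

-- A's inner j-loop, for a fixed valid outer index i, collects exactly the filtered pairs.
lemma pv_inner_eq (names : List String) (i : Int) (hi : 0 ≤ i) (acc : List (String × String)) :
    (PySem.List.pyRange (i + 1) (PySem.List.len names)).foldl (fun nested_pairs j =>
      if PySem.List.pyGetD names i "" == PySem.List.pyGetD names j "" then nested_pairs
      else if PySem.Str.isIn (PySem.List.pyGetD names i "") (PySem.List.pyGetD names j "") then
        nested_pairs ++ [(PySem.List.pyGetD names i "", PySem.List.pyGetD names j "")]
      else nested_pairs) acc
    = acc ++ ((names.drop (i + 1).toNat).filter (fun l =>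
        !(PySem.List.pyGetD names i "" == l) && PySem.Str.isIn (PySem.List.pyGetD names i "") l)).map
        (fun l => (PySem.List.pyGetD names i "", l)) := by
  set s := PySem.List.pyGetD names i "" with hs
  rw [PySem.List.foldl_pyRange_pyGetD names ""
        (f := fun nested_pairs l =>
          if s == l then nested_pairs
          else if PySem.Str.isIn s l then nested_pairs ++ [(s, l)] else nested_pairs)
        acc (by omega)]
  have hbody : ∀ (acc' : List (String × String)) (l : String), l ∈ names.drop (i+1).toNat →
      (if s == l then acc'
       else if PySem.Str.isIn s l then acc' ++ [(s, l)] else acc')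
      = (if (!(s == l) && PySem.Str.isIn s l) then acc' ++ [(s, l)] else acc') := by
    intro acc' l _
    cases (s == l) <;> cases PySem.Str.isIn s l <;> simp
  exact (PySem.List.foldl_congr_mem (names.drop (i + 1).toNat)
        (f := fun acc' l =>
          if s == l then acc'
          else if PySem.Str.isIn s l then acc' ++ [(s, l)] else acc')
        (g := fun acc' l =>
          if (!(s == l) && PySem.Str.isIn s l) then acc' ++ [(s, l)] else acc')
        (init := acc) hbody).trans
    (PySem.List.foldl_append_if (fun l => !(s == l) && PySem.Str.isIn s l) (fun l => (s, l)) _ acc)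

-- A's outer loop from index a onward equals B's queue loop on the dropped suffix,
-- provided the list is length-sorted.
lemma pv_outer_aux (names : List String)
    (hp : names.Pairwise (fun x y => PySem.Str.len x ≤ PySem.Str.len y)) :
    ∀ (k a : Nat), names.length - a = k → ∀ (acc : List (String × String)),
    (PySem.List.pyRange (a : Int) (PySem.List.len names)).foldl (fun nested_pairs i =>
      (PySem.List.pyRange (i + 1) (PySem.List.len names)).foldl (fun nested_pairs j =>
        if PySem.List.pyGetD names i "" == PySem.List.pyGetD names j "" then nested_pairs
        else if PySem.Str.isIn (PySem.List.pyGetD names i "") (PySem.List.pyGetD names j "") then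
          nested_pairs ++ [(PySem.List.pyGetD names i "", PySem.List.pyGetD names j "")]
        else nested_pairs) nested_pairs) acc
    = pvCollect (names.drop a) acc := by
  intro k
  induction k with
  | zero =>
    intro a ha acc
    have hge : names.length ≤ a := by omega
    rw [PySem.List.pyRange_one_eq_nil (by simp [PySem.List.len]; exact_mod_cast hge),
        List.drop_eq_nil_of_le hge]
    rfl
  | succ k ih =>
    intro a ha acc
    have hlt : a < names.length := by omega
    have hcons : PySem.List.pyRange (a : Int) (PySem.List.len names)
        = (a : Int) :: PySem.List.pyRange ((a : Int) + 1) (PySem.List.len names) := by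
      apply PySem.List.pyRange_one_cons
      simp [PySem.List.len]; exact_mod_cast hlt
    rw [hcons, List.foldl_cons, pv_inner_eq names (a : Int) (by omega)]
    have hsa : PySem.List.pyGetD names (a : Int) "" = names[a] := by
      rw [PySem.List.pyGetD_eq_getElem names "" (by omega) (by exact_mod_cast hlt)]
      simp
    have htoNat : ((a : Int) + 1).toNat = a + 1 := by omega
    have hdrop : names.drop a = names[a] :: names.drop (a + 1) := List.drop_eq_getElem_cons hlt
    have hpair : ∀ l ∈ names.drop (a + 1), PySem.Str.len names[a] ≤ PySem.Str.len l := by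
      have := List.Pairwise.sublist (List.drop_sublist a names) hp
      rw [hdrop] at this
      exact (List.pairwise_cons.mp this).1
    have hfilter : (names.drop (a + 1)).filter (fun l =>
          !(names[a] == l) && PySem.Str.isIn names[a] l)
        = (names.drop (a + 1)).filter (fun l =>
          decide (PySem.Str.len names[a] < PySem.Str.len l) && PySem.Str.isIn names[a] l) :=
      List.filter_congr (fun l hl => pv_cond_eq _ _ (hpair l hl))
    have hcast : ((a : Int) + 1) = ((a + 1 : Nat) : Int) := by omega
    rw [hsa, htoNat, hfilter, hcast, ih (a + 1) (by omega)]
    rw [hdrop]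
    rfl

-- ===== VERDICT (by name: the statement is the Claim_ definition above) =====
theorem detect_nested_values_spec : Claim_equal_detect_nested_values := by
  intro group_names _
  unfold Spec_detect_nested_values detect_nested_values detect_nested_values_alt
  have := pv_outer_aux (PySem.List.sorted group_names (fun s => PySem.Str.len s))
    (PySem.List.sorted_pairwise group_names (fun s => PySem.Str.len s))
    (PySem.List.sorted group_names (fun s => PySem.Str.len s)).length 0 (by omega) []
  simpa using this
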